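-- pv_equiv track=rewrite | github.com/AClon314/mocap-wrapper | src/mocap_wrapper/run/lib.py | invert_ranges
-- ===== SOURCE A (Python) =====
-- from typing import Literal, Sequence, TypeVar
--
-- def invert_ranges(ranges: Sequence[tuple], total_range: tuple) -> list[tuple]:
--     """
--     Invert the given ranges within the total_range.
--
--     Args:
--         ranges: A sequence of ranges to be inverted.
--         total_range: The total range within which the inversion is performed.
--
--     Returns:
--         list(tuple): The inverted ranges.
--     """
--     total_start, total_end = total_range
--     valid_ranges = []
--     # Truncate ranges to fit within total_range and collect valid ones
--     for r in ranges:
--         start = max(r[0], total_start)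
--         end = min(r[1], total_end)
--         if start < end:
--             valid_ranges.append((start, end))
--
--     # Merge overlapping or adjacent ranges
--     if not valid_ranges:
--         return [(total_start, total_end)] if total_start < total_end else []
--
--     sorted_ranges = sorted(valid_ranges, key=lambda x: x[0])
--     merged = [sorted_ranges[0]]
--     for current in sorted_ranges[1:]:
--         last = merged[-1]
--         if current[0] <= last[1]:
--             merged[-1] = (last[0], max(last[1], current[1]))
--         else:
--             merged.append(current)
--
--     # Generate inverted ranges
--     inverted = []
--     prev_end = total_start
--     for interval in merged:
--         current_start = interval[0]
--         if prev_end < current_start: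
--             inverted.append((prev_end, current_start))
--         prev_end = max(prev_end, interval[1])
--     if prev_end < total_end:
--         inverted.append((prev_end, total_end))
--
--     return inverted
-- ===== SOURCE B (Python) =====
-- def invert_ranges(ranges, total_range):
--     total_start, total_end = total_range
--     # clip every range to the total range, keep the non-empty ones, sort by start
--     clipped = [(max(r[0], total_start), min(r[1], total_end)) for r in ranges]
--     clipped = [p for p in clipped if p[0] < p[1]]
--     clipped.sort(key=lambda p: p[0])
--     # single sweep: emit the gap before each covered block, no merge list needed
--     out = []
--     prev = total_start
--     for s, e in clipped:
--         if prev < s: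
--             out.append((prev, s))
--         if e > prev:
--             prev = e
--     if prev < total_end:
--         out.append((prev, total_end))
--     return out
-- ===== Notes on version B (the rewrite author's own statement) =====
-- stated objective: simpler
-- what changed: B drops A's intermediate merged-interval list entirely: after clipping and sorting it emits the gaps in one sweep that tracks the running coverage end, instead of A's two passes (merge overlapping ranges, then scan the merged list), and the empty-ranges special case disappears.
import Mathlib
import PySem

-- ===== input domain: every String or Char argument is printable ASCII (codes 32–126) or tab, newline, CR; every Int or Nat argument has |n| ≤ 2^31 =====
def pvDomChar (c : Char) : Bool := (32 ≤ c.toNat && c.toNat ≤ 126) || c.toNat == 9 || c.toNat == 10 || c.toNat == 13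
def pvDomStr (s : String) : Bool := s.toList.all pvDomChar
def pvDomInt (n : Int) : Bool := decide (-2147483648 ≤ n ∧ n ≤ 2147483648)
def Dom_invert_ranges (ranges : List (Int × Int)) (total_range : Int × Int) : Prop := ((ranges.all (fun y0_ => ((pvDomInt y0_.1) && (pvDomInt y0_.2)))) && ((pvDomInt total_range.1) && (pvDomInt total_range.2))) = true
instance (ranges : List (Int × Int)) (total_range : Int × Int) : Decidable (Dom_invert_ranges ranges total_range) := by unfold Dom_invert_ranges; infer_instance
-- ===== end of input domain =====

-- B replaces A's two passes (merge overlapping ranges, then scan the merged list for gaps)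
-- by a single gap sweep over the sorted clipped ranges; same return value, no speed claim.


-- ===== PORT A =====
-- body of A's first loop (clip each range, collect the non-empty ones)
def pvClipStep (total_start total_end : Int) (acc : List (Int × Int)) (r : Int × Int) : List (Int × Int) :=
  let start := max r.1 total_start
  let «end» := min r.2 total_end
  if start < «end» then acc ++ [(start, «end»)] else acc

-- body of A's merge loop (merged[-1] update / append)
def pvMergeStep (merged : List (Int × Int)) (current : Int × Int) : List (Int × Int) :=
  let last := merged.getLastD (0, 0)   -- merged is never empty, so getLastD = merged[-1]
  if current.1 ≤ last.2 then merged.dropLast ++ [(last.1, max last.2 current.2)]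
  else merged ++ [current]

-- body of A's gap loop; state = (inverted, prev_end)
def pvGapStepA (st : List (Int × Int) × Int) (interval : Int × Int) : List (Int × Int) × Int :=
  let current_start := interval.1
  ((if st.2 < current_start then st.1 ++ [(st.2, current_start)] else st.1),
   max st.2 interval.2)

-- literal transliteration of A: clip+collect, the empty special case, merge pass, gap pass
def invert_ranges (ranges : List (Int × Int)) (total_range : Int × Int) : List (Int × Int) :=
  let total_start := total_range.1
  let total_end := total_range.2
  let valid_ranges := ranges.foldl (pvClipStep total_start total_end) []
  -- A tests `if not valid_ranges`; sorted(xs) = [] iff xs = [], and matching on the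
  -- sorted list gives sorted_ranges[0] / sorted_ranges[1:] directly
  match PySem.List.sorted valid_ranges (fun x => x.1) false with
  | [] => if total_start < total_end then [(total_start, total_end)] else []
  | first :: rest =>
    let merged := rest.foldl pvMergeStep [first]
    let st := merged.foldl pvGapStepA ([], total_start)
    if st.2 < total_end then st.1 ++ [(st.2, total_end)] else st.1

-- ===== PORT B =====
-- body of B's single sweep; state = (out, prev)
def pvGapStepB (st : List (Int × Int) × Int) (se : Int × Int) : List (Int × Int) × Int :=
  ((if st.2 < se.1 then st.1 ++ [(st.2, se.1)] else st.1),
   if se.2 > st.2 then se.2 else st.2)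

-- literal transliteration of B: clip (map), filter, sort, one gap sweep
def invert_ranges_alt (ranges : List (Int × Int)) (total_range : Int × Int) : List (Int × Int) :=
  let total_start := total_range.1
  let total_end := total_range.2
  let clipped0 := ranges.map (fun r => (max r.1 total_start, min r.2 total_end))
  let clipped1 := clipped0.filter (fun p => p.1 < p.2)
  let clipped := PySem.List.sorted clipped1 (fun p => p.1) false
  let st := clipped.foldl pvGapStepB ([], total_start)
  if st.2 < total_end then st.1 ++ [(st.2, total_end)] else st.1

-- ===== PRECONDITION & SPEC =====
def Spec_invert_ranges (ranges : List (Int × Int)) (total_range : Int × Int) (out : List (Int × Int)) : Prop := out = invert_ranges_alt ranges total_range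
instance (ranges : List (Int × Int)) (total_range : Int × Int) (out : List (Int × Int)) : Decidable (Spec_invert_ranges ranges total_range out) := by unfold Spec_invert_ranges; infer_instance

-- ===== CLAIM (what is proved, stated in full; the proofs are below) =====
def Claim_equal_invert_ranges : Prop := ∀ (ranges : List (Int × Int)) (total_range : Int × Int), Dom_invert_ranges ranges total_range → Spec_invert_ranges ranges total_range (invert_ranges ranges total_range)

-- ===== LEMMAS AND PROOFS =====

-- the two sweep bodies are the same function (max written as an if in B)
theorem pvGapStepB_eq : pvGapStepB = pvGapStepA := by
  funext st se
  simp only [pvGapStepA, pvGapStepB]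
  refine Prod.ext rfl ?_
  simp only [gt_iff_lt]
  omega

-- A's clip loop builds exactly B's map+filter list
theorem clip_eq (ts te : Int) (ranges : List (Int × Int)) (acc : List (Int × Int)) :
    ranges.foldl (pvClipStep ts te) acc
      = acc ++ ((ranges.map (fun r => (max r.1 ts, min r.2 te))).filter (fun p => p.1 < p.2)) := by
  induction ranges generalizing acc with
  | nil => simp
  | cons r rs ih =>
    simp only [List.foldl_cons, List.map_cons, List.filter_cons, ih, pvClipStep]
    by_cases h : max r.1 ts < min r.2 te
    · simp [h]
    · simp [h]

theorem mergeStep_ne_nil (m : List (Int × Int)) (cur : Int × Int) (_hm : m ≠ []) :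
    pvMergeStep m cur ≠ [] := by
  simp only [pvMergeStep]
  split <;> simp

-- one merge step commutes with the gap sweep
theorem mergeStep_scan (m : List (Int × Int)) (cur : Int × Int) (st : List (Int × Int) × Int)
    (hm : m ≠ []) :
    (pvMergeStep m cur).foldl pvGapStepA st = pvGapStepA (m.foldl pvGapStepA st) cur := by
  rcases (List.eq_nil_or_concat m) with h | ⟨init, l, rfl⟩
  · exact absurd h hm
  simp only [pvMergeStep, List.concat_eq_append] at hm ⊢
  rw [List.getLastD_concat, List.dropLast_concat]
  by_cases h : cur.1 ≤ l.2
  · simp only [if_pos h, List.foldl_append, List.foldl_cons, List.foldl_nil]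
    set s1 := init.foldl pvGapStepA st with hs1
    simp only [pvGapStepA]
    refine Prod.ext ?_ ?_
    · have : ¬ (max s1.2 l.2 < cur.1) := by omega
      simp [this]
    · simp only
      omega
  · simp [if_neg h, List.foldl_append]

-- the whole merge pass commutes with the gap sweep
theorem merge_scan (rest : List (Int × Int)) (m : List (Int × Int)) (st : List (Int × Int) × Int)
    (hm : m ≠ []) :
    (rest.foldl pvMergeStep m).foldl pvGapStepA st = (m ++ rest).foldl pvGapStepA st := by
  induction rest generalizing m st with
  | nil => simp
  | cons cur rest ih =>
    simp only [List.foldl_cons]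
    rw [ih (pvMergeStep m cur) st (mergeStep_ne_nil m cur hm),
        List.foldl_append, List.foldl_append, List.foldl_cons,
        mergeStep_scan m cur st hm]

theorem invert_ranges_eq (ranges : List (Int × Int)) (total_range : Int × Int) :
    invert_ranges ranges total_range = invert_ranges_alt ranges total_range := by
  unfold invert_ranges invert_ranges_alt
  simp only [clip_eq, List.nil_append, pvGapStepB_eq]
  split
  · rename_i h
    rw [h]
    simp
  · rename_i first rest h
    rw [h]
    rw [merge_scan rest [first] ([], total_range.1) (by simp)]
    simp

-- ===== VERDICT (by name: the statement is the Claim_ definition above) =====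
theorem invert_ranges_spec : Claim_equal_invert_ranges := by
  intro ranges total_range _
  show invert_ranges ranges total_range = invert_ranges_alt ranges total_range
  exact invert_ranges_eq ranges total_range
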